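-- pv_equiv track=rewrite | github.com/cgzhang0720/PyAnneal | DefectSystem.py | _return_new_index
-- ===== SOURCE A (Python) =====
-- def _return_new_index(
--                        old_index,
--                        delete_index_list ) :
--     'return new_index after delete defectObjects with delete_index_list.'
--
--     if len( delete_index_list ) == 0 :
--         return old_index
--
--     'increasing according to value.'
--     delete_index_list = sorted( delete_index_list, reverse = False )
--
--     for i in range( len( delete_index_list ) ) :
--
--         if old_index < delete_index_list[ i ] :
--             return old_index - i
--         elif old_index == delete_index_list[ i ] :
--             raise RuntimeError( 'Old_index in delete_index_list, wrong !' )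
--
--     return old_index - len( delete_index_list )
-- ===== SOURCE B (Python) =====
-- def _return_new_index(old_index, delete_index_list):
--     'return new_index after delete defectObjects with delete_index_list.'
--     if len(delete_index_list) == 0:
--         return old_index
--     if old_index in delete_index_list:
--         raise RuntimeError('Old_index in delete_index_list, wrong !')
--     count = sum(1 for d in delete_index_list if d < old_index)
--     return old_index - count
-- ===== Notes on version B (the rewrite author's own statement) =====
-- stated objective: simpler
-- what changed: B drops A's sort-then-indexed-scan entirely and returns old_index minus a single-pass count of deleted indices smaller than old_index (membership check replaces the in-loop equality raise).
import Mathlib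
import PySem

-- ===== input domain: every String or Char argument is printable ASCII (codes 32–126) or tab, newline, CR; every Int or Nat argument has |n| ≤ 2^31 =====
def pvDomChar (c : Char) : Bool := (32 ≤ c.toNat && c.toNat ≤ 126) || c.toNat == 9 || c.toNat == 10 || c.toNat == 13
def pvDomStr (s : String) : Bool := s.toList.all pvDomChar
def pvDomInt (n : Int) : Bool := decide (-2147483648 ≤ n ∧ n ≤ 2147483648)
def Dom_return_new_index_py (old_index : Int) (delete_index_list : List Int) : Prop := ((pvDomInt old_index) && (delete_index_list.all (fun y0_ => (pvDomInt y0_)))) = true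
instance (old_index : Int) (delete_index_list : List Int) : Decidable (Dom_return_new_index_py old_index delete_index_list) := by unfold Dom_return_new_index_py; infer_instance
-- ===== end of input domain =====

-- B replaces A's sort-then-indexed-scan with a single-pass count of deleted indices below old_index (simpler).
-- Pre_ excludes inputs where old_index occurs in delete_index_list: there A raises RuntimeError (no value).


-- ===== PORT A =====
-- the for-loop over the sorted list, with i the current index; 0 in the 'old_index == element'
-- branch stands for the RuntimeError raise (those inputs are excluded by Pre_)
def pvLoopA (old_index : Int) : List Int → Int → Int
  | [], i => old_index - i
  | x :: xs, i =>
      if old_index < x then old_index - i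
      else if old_index = x then 0
      else pvLoopA old_index xs (i + 1)

def return_new_index_py (old_index : Int) (delete_index_list : List Int) : Int :=
  if delete_index_list.length = 0 then old_index
  else pvLoopA old_index (PySem.List.sorted delete_index_list (fun x => x) false) 0

-- ===== PORT B =====
def return_new_index_py_alt (old_index : Int) (delete_index_list : List Int) : Int :=
  if delete_index_list.length = 0 then old_index
  else if delete_index_list.contains old_index then 0  -- RuntimeError raise, excluded by Pre_
  else old_index - (delete_index_list.countP (fun d => decide (d < old_index)) : Int)

-- ===== PRECONDITION & SPEC =====
-- A (and B) raise RuntimeError exactly when old_index occurs in the list; Pre_ excludes those inputs.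
def Pre_return_new_index_py (old_index : Int) (delete_index_list : List Int) : Prop :=
  old_index ∉ delete_index_list
instance (old_index : Int) (delete_index_list : List Int) : Decidable (Pre_return_new_index_py old_index delete_index_list) := by unfold Pre_return_new_index_py; infer_instance

def pvWitness_return_new_index_py : Int × List Int := (4, [1, 2, 6])

def Spec_return_new_index_py (old_index : Int) (delete_index_list : List Int) (out : Int) : Prop := out = return_new_index_py_alt old_index delete_index_list
instance (old_index : Int) (delete_index_list : List Int) (out : Int) : Decidable (Spec_return_new_index_py old_index delete_index_list out) := by unfold Spec_return_new_index_py; infer_instance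

-- ===== CLAIM (what is proved, stated in full; the proofs are below) =====
def Claim_equal_return_new_index_py : Prop := ∀ (old_index : Int) (delete_index_list : List Int), Dom_return_new_index_py old_index delete_index_list → Pre_return_new_index_py old_index delete_index_list → Spec_return_new_index_py old_index delete_index_list (return_new_index_py old_index delete_index_list)

-- ===== LEMMAS AND PROOFS =====

-- On a ≤-sorted list not containing old_index, A's loop subtracts i plus the number of
-- elements smaller than old_index.
theorem pvLoopA_eq (old_index : Int) (s : List Int)
    (hs : s.Pairwise (· ≤ ·)) (hne : old_index ∉ s) (i : Int) :
    pvLoopA old_index s i = old_index - i - (s.countP (fun d => decide (d < old_index)) : Int) := by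
  induction s generalizing i with
  | nil => simp [pvLoopA]
  | cons x xs ih =>
      rcases List.pairwise_cons.mp hs with ⟨hall, hxs⟩
      have hx : old_index ≠ x := fun h => hne (h ▸ List.mem_cons_self)
      have hnx : old_index ∉ xs := fun h => hne (List.mem_cons_of_mem _ h)
      by_cases hlt : old_index < x
      · have hzero : xs.countP (fun d => decide (d < old_index)) = 0 := by
          rw [List.countP_eq_zero]
          intro y hy
          have := hall y hy
          simp only [decide_eq_true_eq]
          omega
        simp [pvLoopA, hlt, List.countP_cons, hzero]
        omega
      · have hgt : x < old_index := by omega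
        rw [pvLoopA, if_neg hlt, if_neg hx, ih hxs hnx]
        simp [hgt]
        omega

theorem return_new_index_py_eq (old_index : Int) (delete_index_list : List Int)
    (h : old_index ∉ delete_index_list) :
    return_new_index_py old_index delete_index_list = return_new_index_py_alt old_index delete_index_list := by
  unfold return_new_index_py return_new_index_py_alt
  by_cases hlen : delete_index_list.length = 0
  · simp [hlen]
  · have hperm : (PySem.List.sorted delete_index_list (fun x => x) false).Perm delete_index_list :=
      PySem.List.sorted_perm delete_index_list (fun x => x) false
    have hns : old_index ∉ PySem.List.sorted delete_index_list (fun x => x) false := by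
      intro hmem; exact h (hperm.mem_iff.mp hmem)
    have hpw : (PySem.List.sorted delete_index_list (fun x => x) false).Pairwise (· ≤ ·) :=
      PySem.List.sorted_pairwise delete_index_list (fun x => x)
    have hcontains : delete_index_list.contains old_index = false := by
      simpa using h
    rw [if_neg hlen, if_neg hlen, hcontains]
    simp only [Bool.false_eq_true, if_false]
    rw [pvLoopA_eq old_index _ hpw hns 0, hperm.countP_eq]
    ring

-- ===== VERDICT (by name: the statement is the Claim_ definition above) =====
theorem return_new_index_py_spec : Claim_equal_return_new_index_py := by
  intro old_index delete_index_list _ hpre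
  unfold Spec_return_new_index_py
  exact return_new_index_py_eq old_index delete_index_list hpre
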